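-- pv_equiv track=rewrite | github.com/bencodess/safe_comms | app/moderation.py | _inflate_base_terms
-- ===== SOURCE A (Python) =====
-- BASE_PREFIXES = [
--     "dirty", "filthy", "stupid", "dumb", "crazy", "foul", "gross", "toxic", "bloody", "damn",
--     "hard", "extreme", "pure", "ultra", "mega", "insane", "savage", "aggressive", "nasty", "vile",
--     "evil", "brutal", "raw", "wild", "mad", "cold", "dark", "loud", "chaos", "mean",
-- ]
--
-- BASE_SUFFIXES = [
--     "head", "face", "brain", "mouth", "rat", "pig", "dog", "lord", "king", "queen",
--     "mode", "move", "plan", "crew", "zone", "style", "energy", "storm", "wave", "pattern",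
-- ]
--
-- def _inflate_base_terms(terms: dict[str, set[str]], target_total: int) -> dict[str, set[str]]:
--     total = sum(len(values) for values in terms.values())
--     if total >= target_total:
--         return terms
--
--     all_by_category = {cat: sorted(values) for cat, values in terms.items()}
--
--     while total < target_total:
--         changed = False
--         for category, seeds in all_by_category.items():
--             for seed in seeds:
--                 for prefix in BASE_PREFIXES:
--                     candidate = f"{prefix} {seed}"
--                     if candidate not in terms[category]:
--                         terms[category].add(candidate)
--                         total += 1
--                         changed = True
--                         if total >= target_total:
--                             return terms
--                 for suffix in BASE_SUFFIXES:
--                     candidate = f"{seed} {suffix}"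
--                     if candidate not in terms[category]:
--                         terms[category].add(candidate)
--                         total += 1
--                         changed = True
--                         if total >= target_total:
--                             return terms
--                 if " " not in seed:
--                     for prefix in BASE_PREFIXES[:10]:
--                         for suffix in BASE_SUFFIXES[:10]:
--                             candidate = f"{prefix} {seed} {suffix}"
--                             if candidate not in terms[category]:
--                                 terms[category].add(candidate)
--                                 total += 1
--                                 changed = True
--                                 if total >= target_total:
--                                     return terms
--         if not changed:
--             return terms
--
--     return terms
-- ===== SOURCE B (Python) =====
-- BASE_PREFIXES = [
--     "dirty", "filthy", "stupid", "dumb", "crazy", "foul", "gross", "toxic", "bloody", "damn",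
--     "hard", "extreme", "pure", "ultra", "mega", "insane", "savage", "aggressive", "nasty", "vile",
--     "evil", "brutal", "raw", "wild", "mad", "cold", "dark", "loud", "chaos", "mean",
-- ]
--
-- BASE_SUFFIXES = [
--     "head", "face", "brain", "mouth", "rat", "pig", "dog", "lord", "king", "queen",
--     "mode", "move", "plan", "crew", "zone", "style", "energy", "storm", "wave", "pattern",
-- ]
--
--
-- def _seed_variants(seed):
--     """All generated variants of one seed, in enumeration order."""
--     out = [f"{p} {seed}" for p in BASE_PREFIXES]
--     out += [f"{seed} {s}" for s in BASE_SUFFIXES]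
--     if " " not in seed:
--         out += [f"{p} {seed} {s}" for p in BASE_PREFIXES[:10] for s in BASE_SUFFIXES[:10]]
--     return out
--
--
-- def _inflate_base_terms(terms: dict[str, set[str]], target_total: int) -> dict[str, set[str]]:
--     # Plan-then-slice: for each category build the complete ordered list of
--     # genuinely new candidates (deduplicated via a seen-set), then consume the
--     # global deficit by slicing that plan, and bulk-update the bucket.
--     remaining = target_total - sum(len(v) for v in terms.values())
--     if remaining <= 0:
--         return terms
--     for cat, bucket in terms.items():
--         plan = []
--         seen = set(bucket)
--         for seed in sorted(bucket):
--             for cand in _seed_variants(seed):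
--                 if cand not in seen:
--                     seen.add(cand)
--                     plan.append(cand)
--         chosen = plan[:remaining]
--         bucket.update(chosen)
--         remaining -= len(chosen)
--         if remaining <= 0:
--             break
--     return terms
-- ===== Notes on version B (the rewrite author's own statement) =====
-- stated objective: alternative
-- what changed: Replaces A's global counter with early returns inside a while/changed fixed-point sweep by a two-stage per-category pipeline: first build the complete ordered plan of genuinely new candidates with an explicit seen-set, then consume the global deficit by slicing the plan and bulk-updating the bucket.
import Mathlib
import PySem

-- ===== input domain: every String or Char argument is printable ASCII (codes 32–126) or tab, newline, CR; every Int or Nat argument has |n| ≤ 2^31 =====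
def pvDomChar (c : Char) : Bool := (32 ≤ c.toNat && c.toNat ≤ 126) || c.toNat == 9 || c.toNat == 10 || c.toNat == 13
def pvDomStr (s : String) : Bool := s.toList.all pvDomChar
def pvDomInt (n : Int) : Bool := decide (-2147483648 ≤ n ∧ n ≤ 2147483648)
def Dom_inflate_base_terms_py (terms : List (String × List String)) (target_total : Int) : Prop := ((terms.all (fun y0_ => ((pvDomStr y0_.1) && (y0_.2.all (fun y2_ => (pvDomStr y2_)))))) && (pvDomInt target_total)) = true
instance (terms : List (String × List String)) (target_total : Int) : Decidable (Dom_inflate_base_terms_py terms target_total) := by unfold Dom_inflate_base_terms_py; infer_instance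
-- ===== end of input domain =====

-- B replaces A's while/changed sweep with a global counter and early returns by a
-- two-stage per-category pipeline (build the full ordered plan of new candidates
-- with a seen-set, then slice it by the remaining deficit and bulk-update); both
-- Pythons mutate `terms` in place identically — the theorems are about the
-- returned dict.

-- ===== PORT A =====
-- module constants BASE_PREFIXES / BASE_SUFFIXES (shared by both ports)
def pyPrefixes : List String :=
  ["dirty", "filthy", "stupid", "dumb", "crazy", "foul", "gross", "toxic", "bloody", "damn",
   "hard", "extreme", "pure", "ultra", "mega", "insane", "savage", "aggressive", "nasty", "vile",
   "evil", "brutal", "raw", "wild", "mad", "cold", "dark", "loud", "chaos", "mean"]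

def pySuffixes : List String :=
  ["head", "face", "brain", "mouth", "rat", "pig", "dog", "lord", "king", "queen",
   "mode", "move", "plan", "crew", "zone", "style", "energy", "storm", "wave", "pattern"]

abbrev TermDict := PySem.Dict String (List String)

-- `for prefix in BASE_PREFIXES: …` (inner body of A's first inner loop);
-- .error d models A's early `return terms`, .ok carries (terms, total, changed)
def pyA_forPrefixes (target : Int) (cat seed : String) (ps : List String)
    (d : TermDict) (total : Int) (ch : Bool) : Except TermDict (TermDict × Int × Bool) :=
  match ps with
  | [] => .ok (d, total, ch)
  | p :: rest =>
      let candidate := p ++ " " ++ seed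
      if candidate ∈ PySem.Dict.getD d cat [] then
        pyA_forPrefixes target cat seed rest d total ch
      else
        let d' := PySem.Dict.modify d cat [] (fun v => PySem.Set.add v candidate)
        if target ≤ total + 1 then .error d'
        else pyA_forPrefixes target cat seed rest d' (total + 1) true

-- `for suffix in BASE_SUFFIXES: …`
def pyA_forSuffixes (target : Int) (cat seed : String) (ss : List String)
    (d : TermDict) (total : Int) (ch : Bool) : Except TermDict (TermDict × Int × Bool) :=
  match ss with
  | [] => .ok (d, total, ch)
  | s :: rest =>
      let candidate := seed ++ " " ++ s
      if candidate ∈ PySem.Dict.getD d cat [] then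
        pyA_forSuffixes target cat seed rest d total ch
      else
        let d' := PySem.Dict.modify d cat [] (fun v => PySem.Set.add v candidate)
        if target ≤ total + 1 then .error d'
        else pyA_forSuffixes target cat seed rest d' (total + 1) true

-- inner `for suffix in BASE_SUFFIXES[:10]: …` of the combo block
def pyA_forComboSuf (target : Int) (cat seed p : String) (ss : List String)
    (d : TermDict) (total : Int) (ch : Bool) : Except TermDict (TermDict × Int × Bool) :=
  match ss with
  | [] => .ok (d, total, ch)
  | s :: rest =>
      let candidate := p ++ " " ++ seed ++ " " ++ s
      if candidate ∈ PySem.Dict.getD d cat [] then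
        pyA_forComboSuf target cat seed p rest d total ch
      else
        let d' := PySem.Dict.modify d cat [] (fun v => PySem.Set.add v candidate)
        if target ≤ total + 1 then .error d'
        else pyA_forComboSuf target cat seed p rest d' (total + 1) true

-- outer `for prefix in BASE_PREFIXES[:10]: …` of the combo block
def pyA_forComboPre (target : Int) (cat seed : String) (ps : List String)
    (d : TermDict) (total : Int) (ch : Bool) : Except TermDict (TermDict × Int × Bool) :=
  match ps with
  | [] => .ok (d, total, ch)
  | p :: rest =>
      match pyA_forComboSuf target cat seed p (PySem.List.slice pySuffixes none (some 10)) d total ch with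
      | .error e => .error e
      | .ok (d1, t1, c1) => pyA_forComboPre target cat seed rest d1 t1 c1

-- body of `for seed in seeds:`
def pyA_forSeed (target : Int) (cat seed : String)
    (d : TermDict) (total : Int) (ch : Bool) : Except TermDict (TermDict × Int × Bool) :=
  match pyA_forPrefixes target cat seed pyPrefixes d total ch with
  | .error e => .error e
  | .ok (d1, t1, c1) =>
      match pyA_forSuffixes target cat seed pySuffixes d1 t1 c1 with
      | .error e => .error e
      | .ok (d2, t2, c2) =>
          if PySem.Str.isIn " " seed then .ok (d2, t2, c2)
          else pyA_forComboPre target cat seed (PySem.List.slice pyPrefixes none (some 10)) d2 t2 c2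

def pyA_forSeeds (target : Int) (cat : String) (seeds : List String)
    (d : TermDict) (total : Int) (ch : Bool) : Except TermDict (TermDict × Int × Bool) :=
  match seeds with
  | [] => .ok (d, total, ch)
  | seed :: rest =>
      match pyA_forSeed target cat seed d total ch with
      | .error e => .error e
      | .ok (d1, t1, c1) => pyA_forSeeds target cat rest d1 t1 c1

-- `for category, seeds in all_by_category.items():`
def pyA_forCats (target : Int) (abc : List (String × List String))
    (d : TermDict) (total : Int) (ch : Bool) : Except TermDict (TermDict × Int × Bool) :=
  match abc with
  | [] => .ok (d, total, ch)
  | (cat, seeds) :: rest =>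
      match pyA_forSeeds target cat seeds d total ch with
      | .error e => .error e
      | .ok (d1, t1, c1) => pyA_forCats target rest d1 t1 c1

-- `while total < target_total:` with the `changed` flag
def pyA_while (fuel : Nat) (target : Int) (abc : List (String × List String)) (d : TermDict) (total : Int) : TermDict :=
  match fuel with
  | 0 => d
  | Nat.succ f =>
      if total < target then
        match pyA_forCats target abc d total false with
        | .error e => e
        | .ok (d1, t1, c1) => if c1 = true then pyA_while f target abc d1 t1 else d1
      else d

def inflate_base_terms_py (terms : List (String × List String)) (target_total : Int) : List (String × List String) :=
  let d : TermDict := PySem.Dict.mk terms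
  let total : Int := (d.values.map (fun v => (v.length : Int))).sum
  if target_total ≤ total then d.items
  else
    let abc := d.items.map (fun cv => (cv.1, PySem.List.sorted cv.2 (fun x => x) false))
    (pyA_while ((target_total - total).toNat + 1) target_total abc d total).items

-- ===== PORT B =====
-- `_seed_variants(seed)`: all generated variants of one seed, in order
def pyB_seedVariants (seed : String) : List String :=
  pyPrefixes.map (fun p => p ++ " " ++ seed) ++
  pySuffixes.map (fun s => seed ++ " " ++ s) ++
  (if PySem.Str.isIn " " seed then []
   else (PySem.List.slice pyPrefixes none (some 10)).flatMap (fun p =>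
     (PySem.List.slice pySuffixes none (some 10)).map (fun s => p ++ " " ++ seed ++ " " ++ s)))

-- inner `for cand in _seed_variants(seed): if cand not in seen: …`
def pyB_dedupSeed (cands seen plan : List String) : List String × List String :=
  match cands with
  | [] => (seen, plan)
  | c :: rest =>
      if c ∈ seen then pyB_dedupSeed rest seen plan
      else pyB_dedupSeed rest (PySem.Set.add seen c) (plan ++ [c])

-- `for seed in sorted(bucket): …` building the category's plan
def pyB_plan (seeds seen plan : List String) : List String :=
  match seeds with
  | [] => plan
  | s :: rest =>
      let sp := pyB_dedupSeed (pyB_seedVariants s) seen plan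
      pyB_plan rest sp.1 sp.2

-- `for cat, bucket in terms.items(): …` — plan, slice by the deficit, bulk-update
def pyB_cats (remaining : Int) (items : List (String × List String)) : List (String × List String) :=
  match items with
  | [] => []
  | (cat, bucket) :: rest =>
      let plan := pyB_plan (PySem.List.sorted bucket (fun x => x) false) (PySem.Set.ofList bucket) []
      let chosen := PySem.List.slice plan none (some remaining)
      let bucket' := PySem.Set.update bucket chosen
      let remaining' := remaining - (chosen.length : Int)
      if remaining' ≤ 0 then (cat, bucket') :: rest
      else (cat, bucket') :: pyB_cats remaining' rest

def inflate_base_terms_py_alt (terms : List (String × List String)) (target_total : Int) : List (String × List String) :=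
  let d : TermDict := PySem.Dict.mk terms
  let remaining : Int := target_total - (d.values.map (fun v => (v.length : Int))).sum
  if remaining ≤ 0 then d.items
  else pyB_cats remaining d.items

-- ===== PRECONDITION & SPEC =====
-- Pre_ excludes association lists with duplicate category keys, which do not
-- represent any Python dict (a dict cannot contain them); there the encoding's
-- first-match lookup makes either behaviour accidental.
def Pre_inflate_base_terms_py (terms : List (String × List String)) (target_total : Int) : Prop :=
  (terms.map Prod.fst).Nodup
instance (terms : List (String × List String)) (target_total : Int) : Decidable (Pre_inflate_base_terms_py terms target_total) := by unfold Pre_inflate_base_terms_py; infer_instance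

def pvWitness_inflate_base_terms_py : (List (String × List String)) × Int := ([("a", ["x"])], 1)

def Spec_inflate_base_terms_py (terms : List (String × List String)) (target_total : Int) (out : List (String × List String)) : Prop := out = inflate_base_terms_py_alt terms target_total
instance (terms : List (String × List String)) (target_total : Int) (out : List (String × List String)) : Decidable (Spec_inflate_base_terms_py terms target_total out) := by unfold Spec_inflate_base_terms_py; infer_instance

-- ===== CLAIM (what is proved, stated in full; the proofs are below) =====
def Claim_equal_inflate_base_terms_py : Prop := ∀ (terms : List (String × List String)) (target_total : Int), Dom_inflate_base_terms_py terms target_total → Pre_inflate_base_terms_py terms target_total → Spec_inflate_base_terms_py terms target_total (inflate_base_terms_py terms target_total)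

-- ===== LEMMAS AND PROOFS =====

-- (cat, candidate) pairs yielded for one seed / collapse of runE's result
def candPairs (cat seed : String) : List (String × String) :=
  (pyB_seedVariants seed).map (fun c => (cat, c))

-- the whole candidate stream of a snapshot
def catStream (abc : List (String × List String)) : List (String × String) :=
  abc.flatMap (fun cv => cv.2.flatMap (fun seed => candPairs cv.1 seed))

-- generic runner over a flat candidate stream, with A's early-return as .error
def runE (target : Int) (pairs : List (String × String)) (d : TermDict) (total : Int) (ch : Bool) :
    Except TermDict (TermDict × Int × Bool) :=
  match pairs with
  | [] => .ok (d, total, ch)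
  | (cat, cand) :: rest =>
      if cand ∈ PySem.Dict.getD d cat [] then runE target rest d total ch
      else
        let d' := PySem.Dict.modify d cat [] (fun v => PySem.Set.add v cand)
        if target ≤ total + 1 then .error d'
        else runE target rest d' (total + 1) true

def outDict (r : Except TermDict (TermDict × Int × Bool)) : TermDict :=
  match r with
  | .error e => e
  | .ok (d, _, _) => d

theorem runE_append (target : Int) :
    ∀ (l1 l2 : List (String × String)) (d : TermDict) (total : Int) (ch : Bool),
      runE target (l1 ++ l2) d total ch =
        match runE target l1 d total ch with
        | .error e => .error e
        | .ok (d1, t1, c1) => runE target l2 d1 t1 c1 := by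
  intro l1
  induction l1 with
  | nil => intro l2 d total ch; rfl
  | cons pr rest ih =>
      intro l2 d total ch
      obtain ⟨cat, cand⟩ := pr
      simp only [List.cons_append, runE]
      split
      · exact ih _ _ _ _
      · split
        · rfl
        · exact ih _ _ _ _

-- flattening: each of A's nested loops is runE on the corresponding stream
theorem pyA_forPrefixes_eq_runE (target : Int) (cat seed : String) :
    ∀ (ps : List String) (d : TermDict) (total : Int) (ch : Bool),
      pyA_forPrefixes target cat seed ps d total ch =
        runE target (ps.map (fun p => (cat, p ++ " " ++ seed))) d total ch := by
  intro ps
  induction ps with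
  | nil => intro d total ch; rfl
  | cons p rest ih =>
      intro d total ch
      simp only [pyA_forPrefixes, List.map_cons, runE]
      split
      · exact ih _ _ _
      · split
        · rfl
        · exact ih _ _ _

theorem pyA_forSuffixes_eq_runE (target : Int) (cat seed : String) :
    ∀ (ss : List String) (d : TermDict) (total : Int) (ch : Bool),
      pyA_forSuffixes target cat seed ss d total ch =
        runE target (ss.map (fun s => (cat, seed ++ " " ++ s))) d total ch := by
  intro ss
  induction ss with
  | nil => intro d total ch; rfl
  | cons s rest ih =>
      intro d total ch
      simp only [pyA_forSuffixes, List.map_cons, runE]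
      split
      · exact ih _ _ _
      · split
        · rfl
        · exact ih _ _ _

theorem pyA_forComboSuf_eq_runE (target : Int) (cat seed p : String) :
    ∀ (ss : List String) (d : TermDict) (total : Int) (ch : Bool),
      pyA_forComboSuf target cat seed p ss d total ch =
        runE target (ss.map (fun s => (cat, p ++ " " ++ seed ++ " " ++ s))) d total ch := by
  intro ss
  induction ss with
  | nil => intro d total ch; rfl
  | cons s rest ih =>
      intro d total ch
      simp only [pyA_forComboSuf, List.map_cons, runE]
      split
      · exact ih _ _ _
      · split
        · rfl
        · exact ih _ _ _

theorem pyA_forComboPre_eq_runE (target : Int) (cat seed : String) :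
    ∀ (ps : List String) (d : TermDict) (total : Int) (ch : Bool),
      pyA_forComboPre target cat seed ps d total ch =
        runE target (ps.flatMap (fun p =>
          (PySem.List.slice pySuffixes none (some 10)).map (fun s => (cat, p ++ " " ++ seed ++ " " ++ s)))) d total ch := by
  intro ps
  induction ps with
  | nil => intro d total ch; rfl
  | cons p rest ih =>
      intro d total ch
      simp only [pyA_forComboPre, List.flatMap_cons]
      rw [runE_append, pyA_forComboSuf_eq_runE]
      cases runE target ((PySem.List.slice pySuffixes none (some 10)).map (fun s => (cat, p ++ " " ++ seed ++ " " ++ s))) d total ch with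
      | error e => rfl
      | ok st => obtain ⟨d1, t1, c1⟩ := st; exact ih _ _ _

theorem candPairs_def (cat seed : String) :
    candPairs cat seed =
      pyPrefixes.map (fun p => (cat, p ++ " " ++ seed)) ++
      pySuffixes.map (fun s => (cat, seed ++ " " ++ s)) ++
      (if PySem.Str.isIn " " seed then []
       else (PySem.List.slice pyPrefixes none (some 10)).flatMap (fun p =>
         (PySem.List.slice pySuffixes none (some 10)).map (fun s => (cat, p ++ " " ++ seed ++ " " ++ s)))) := by
  simp only [candPairs, pyB_seedVariants, List.map_append]
  congr 1
  split
  · simp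
  · simp [List.map_flatMap, Function.comp_def]

theorem pyA_forSeed_eq_runE (target : Int) (cat seed : String)
    (d : TermDict) (total : Int) (ch : Bool) :
    pyA_forSeed target cat seed d total ch = runE target (candPairs cat seed) d total ch := by
  rw [candPairs_def]
  simp only [pyA_forSeed]
  rw [runE_append, runE_append, pyA_forPrefixes_eq_runE]
  cases runE target (pyPrefixes.map (fun p => (cat, p ++ " " ++ seed))) d total ch with
  | error e => rfl
  | ok st1 =>
      obtain ⟨d1, t1, c1⟩ := st1
      dsimp only
      rw [pyA_forSuffixes_eq_runE]
      cases runE target (pySuffixes.map (fun s => (cat, seed ++ " " ++ s))) d1 t1 c1 with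
      | error e => rfl
      | ok st2 =>
          obtain ⟨d2, t2, c2⟩ := st2
          dsimp only
          split
          · rfl
          · rw [pyA_forComboPre_eq_runE]

theorem pyA_forSeeds_eq_runE (target : Int) (cat : String) :
    ∀ (seeds : List String) (d : TermDict) (total : Int) (ch : Bool),
      pyA_forSeeds target cat seeds d total ch =
        runE target (seeds.flatMap (fun seed => candPairs cat seed)) d total ch := by
  intro seeds
  induction seeds with
  | nil => intro d total ch; rfl
  | cons seed rest ih =>
      intro d total ch
      simp only [pyA_forSeeds, List.flatMap_cons]
      rw [runE_append, pyA_forSeed_eq_runE]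
      cases runE target (candPairs cat seed) d total ch with
      | error e => rfl
      | ok st => obtain ⟨d1, t1, c1⟩ := st; exact ih _ _ _

theorem pyA_forCats_eq_runE (target : Int) :
    ∀ (abc : List (String × List String)) (d : TermDict) (total : Int) (ch : Bool),
      pyA_forCats target abc d total ch = runE target (catStream abc) d total ch := by
  intro abc
  induction abc with
  | nil => intro d total ch; rfl
  | cons cv rest ih =>
      intro d total ch
      obtain ⟨cat, seeds⟩ := cv
      simp only [pyA_forCats, catStream, List.flatMap_cons]
      rw [runE_append, pyA_forSeeds_eq_runE]
      cases runE target (seeds.flatMap (fun seed => candPairs cat seed)) d total ch with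
      | error e => rfl
      | ok st => obtain ⟨d1, t1, c1⟩ := st; exact ih _ _ _

-- runE only grows the buckets …
theorem runE_mem_preserved (target : Int) :
    ∀ (pairs : List (String × String)) (d : TermDict) (total : Int) (ch : Bool) d' t c,
      runE target pairs d total ch = .ok (d', t, c) →
      ∀ (cat cand : String), cand ∈ PySem.Dict.getD d cat [] → cand ∈ PySem.Dict.getD d' cat [] := by
  intro pairs
  induction pairs with
  | nil => intro d total ch d' t c h cat cand hm
           simp only [runE] at h; cases h; exact hm
  | cons pr rest ih =>
      intro d total ch d' t c h cat cand hm
      obtain ⟨cat0, cand0⟩ := pr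
      simp only [runE] at h
      split at h
      · exact ih _ _ _ _ _ _ h cat cand hm
      · split at h
        · cases h
        · refine ih _ _ _ _ _ _ h cat cand ?_
          rw [PySem.Dict.getD_modify]
          split
          · rename_i heq
            subst heq
            exact (PySem.Set.mem_add _ _ _).mpr (Or.inl hm)
          · exact hm

-- … and after a completed sweep every streamed candidate is present
theorem runE_all_mem (target : Int) :
    ∀ (pairs : List (String × String)) (d : TermDict) (total : Int) (ch : Bool) d' t c,
      runE target pairs d total ch = .ok (d', t, c) →
      ∀ pr ∈ pairs, pr.2 ∈ PySem.Dict.getD d' pr.1 [] := by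
  intro pairs
  induction pairs with
  | nil => intro d total ch d' t c h pr hpr; cases hpr
  | cons pr0 rest ih =>
      intro d total ch d' t c h pr hpr
      obtain ⟨cat0, cand0⟩ := pr0
      simp only [runE] at h
      rcases List.mem_cons.mp hpr with heq | hmem
      · subst heq
        split at h
        · rename_i hin
          exact runE_mem_preserved target _ _ _ _ _ _ _ h cat0 cand0 hin
        · split at h
          · cases h
          · refine runE_mem_preserved target _ _ _ _ _ _ _ h cat0 cand0 ?_
            rw [PySem.Dict.getD_modify, if_pos rfl]
            exact (PySem.Set.mem_add _ _ _).mpr (Or.inr rfl)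
      · split at h
        · exact ih _ _ _ _ _ _ h pr hmem
        · split at h
          · cases h
          · exact ih _ _ _ _ _ _ h pr hmem

-- a sweep over candidates that are all present changes nothing
theorem runE_no_change (target : Int) :
    ∀ (pairs : List (String × String)) (d : TermDict) (total : Int) (ch : Bool),
      (∀ pr ∈ pairs, pr.2 ∈ PySem.Dict.getD d pr.1 []) →
      runE target pairs d total ch = .ok (d, total, ch) := by
  intro pairs
  induction pairs with
  | nil => intro d total ch _; rfl
  | cons pr0 rest ih =>
      intro d total ch hall
      obtain ⟨cat0, cand0⟩ := pr0
      simp only [runE]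
      rw [if_pos (hall (cat0, cand0) (List.mem_cons_self))]
      exact ih _ _ _ (fun pr hpr => hall pr (List.mem_cons_of_mem _ hpr))

-- a completed sweep entered below target stays below target
theorem runE_total_lt (target : Int) :
    ∀ (pairs : List (String × String)) (d : TermDict) (total : Int) (ch : Bool) d' t c,
      runE target pairs d total ch = .ok (d', t, c) → total < target → t < target := by
  intro pairs
  induction pairs with
  | nil => intro d total ch d' t c h hlt; simp only [runE] at h; cases h; exact hlt
  | cons pr0 rest ih =>
      intro d total ch d' t c h hlt
      obtain ⟨cat0, cand0⟩ := pr0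
      simp only [runE] at h
      split at h
      · exact ih _ _ _ _ _ _ h hlt
      · split at h
        · cases h
        · rename_i hge
          exact ih _ _ _ _ _ _ h (by omega)

-- the while/changed loop (with sufficient fuel) collapses to one flat pass
theorem pyA_while_eq_outDict (target : Int) (abc : List (String × List String))
    (d : TermDict) (total : Int) (m : Nat) (hm : 1 ≤ m) (hlt : total < target) :
    pyA_while (m + 1) target abc d total = outDict (runE target (catStream abc) d total false) := by
  obtain ⟨m', rfl⟩ : ∃ m', m = m' + 1 := ⟨m - 1, by omega⟩
  simp only [pyA_while]
  rw [if_pos hlt, pyA_forCats_eq_runE]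
  cases hr : runE target (catStream abc) d total false with
  | error e => simp [outDict]
  | ok st =>
      obtain ⟨d1, t1, c1⟩ := st
      simp only [outDict]
      split
      · rename_i hc
        have ht1 : t1 < target := runE_total_lt target _ _ _ _ _ _ _ hr hlt
        have hpass2 : pyA_forCats target abc d1 t1 false = .ok (d1, t1, false) := by
          rw [pyA_forCats_eq_runE]
          exact runE_no_change target _ d1 t1 false
            (fun pr hpr => runE_all_mem target _ _ _ _ _ _ _ hr pr hpr)
        rw [if_pos ht1, hpass2]
        simp
      · rfl

-- B side: the dedup loop, specified without accumulators
def planOf (cs seen : List String) : List String :=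
  match cs with
  | [] => []
  | c :: rest => if c ∈ seen then planOf rest seen else c :: planOf rest (PySem.Set.add seen c)

def seenAfter (cs seen : List String) : List String :=
  match cs with
  | [] => seen
  | c :: rest => if c ∈ seen then seenAfter rest seen else seenAfter rest (PySem.Set.add seen c)

theorem pyB_dedupSeed_eq : ∀ (cs seen plan : List String),
    pyB_dedupSeed cs seen plan = (seenAfter cs seen, plan ++ planOf cs seen) := by
  intro cs
  induction cs with
  | nil => intro seen plan; simp [pyB_dedupSeed, seenAfter, planOf]
  | cons c rest ih =>
      intro seen plan
      simp only [pyB_dedupSeed, seenAfter, planOf]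
      split
      · exact ih _ _
      · rw [ih]
        simp

theorem planOf_append : ∀ (l1 l2 seen : List String),
    planOf (l1 ++ l2) seen = planOf l1 seen ++ planOf l2 (seenAfter l1 seen) := by
  intro l1
  induction l1 with
  | nil => intro l2 seen; simp [planOf, seenAfter]
  | cons c rest ih =>
      intro l2 seen
      simp only [List.cons_append, planOf, seenAfter]
      split
      · exact ih _ _
      · simp [ih]

theorem pyB_plan_eq : ∀ (seeds seen plan : List String),
    pyB_plan seeds seen plan = plan ++ planOf (seeds.flatMap pyB_seedVariants) seen := by
  intro seeds
  induction seeds with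
  | nil => intro seen plan; simp [pyB_plan, planOf]
  | cons s rest ih =>
      intro seen plan
      simp only [pyB_plan, List.flatMap_cons, pyB_dedupSeed_eq]
      rw [ih, planOf_append, List.append_assoc]

-- shape lemmas: dictionaries whose items list is pre ++ (cat, b) :: rest
theorem keys_shape_aux (cat : String) (pre rest : List (String × List String)) (b : List String)
    (hn : ((pre ++ (cat, b) :: rest).map Prod.fst).Nodup) :
    cat ∉ pre.map Prod.fst ∧ cat ∉ rest.map Prod.fst := by
  rw [List.map_append, List.map_cons] at hn
  constructor
  · intro hmem
    exact (List.disjoint_of_nodup_append hn) hmem (List.mem_cons_self)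
  · have h2 := (List.nodup_append.mp hn).2.1
    exact (List.nodup_cons.mp h2).1

theorem getD_shape (cat : String) (pre rest : List (String × List String)) (b : List String)
    (hn : ((pre ++ (cat, b) :: rest).map Prod.fst).Nodup) :
    PySem.Dict.getD (PySem.Dict.mk (pre ++ (cat, b) :: rest)) cat [] = b := by
  apply PySem.Dict.getD_of_mem_items
  · simp
  · simpa [PySem.Dict.keys] using hn

theorem modify_shape (cat : String) (pre rest : List (String × List String)) (b : List String)
    (f : List String → List String)
    (hn : ((pre ++ (cat, b) :: rest).map Prod.fst).Nodup) :
    PySem.Dict.modify (PySem.Dict.mk (pre ++ (cat, b) :: rest)) cat [] f =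
      PySem.Dict.mk (pre ++ (cat, f b) :: rest) := by
  obtain ⟨hpre, hrest⟩ := keys_shape_aux cat pre rest b hn
  have hb := getD_shape cat pre rest b hn
  have hcontains : (PySem.Dict.mk (pre ++ (cat, b) :: rest)).contains cat = true := by
    rw [PySem.Dict.contains_iff_mem_keys]
    simp [PySem.Dict.keys]
  apply PySem.Dict.ext
  simp only [PySem.Dict.modify, hb]
  rw [PySem.Dict.items_insert_of_contains _ _ hcontains]
  rw [List.map_append, List.map_cons]
  have h1 : pre.map (fun p => if (p.1 == cat) = true then (cat, f b) else p) = pre := by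
    rw [List.map_congr_left (g := id) ?_, List.map_id]
    intro p hp
    have : p.1 ≠ cat := by
      intro he; exact hpre (he ▸ List.mem_map_of_mem hp)
    simp [this]
  have h2 : rest.map (fun p => if (p.1 == cat) = true then (cat, f b) else p) = rest := by
    rw [List.map_congr_left (g := id) ?_, List.map_id]
    intro p hp
    have : p.1 ≠ cat := by
      intro he; exact hrest (he ▸ List.mem_map_of_mem hp)
    simp [this]
  rw [h1, h2]
  simp

-- the core per-category collapse: runE over one category's candidates is
-- exactly "dedup plan, then either stop inside it or append it all"
theorem runE_segment (target : Int) (cat : String) :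
    ∀ (cs : List String) (pre rest : List (String × List String)) (b seen : List String)
      (total : Int) (ch : Bool),
      ((pre ++ (cat, b) :: rest).map Prod.fst).Nodup →
      (∀ x, x ∈ seen ↔ x ∈ b) →
      total < target →
      runE target (cs.map (fun c => (cat, c))) (PySem.Dict.mk (pre ++ (cat, b) :: rest)) total ch =
        (if target ≤ total + ((planOf cs seen).length : Int)
         then .error (PySem.Dict.mk (pre ++ (cat, PySem.Set.update b ((planOf cs seen).take (target - total).toNat)) :: rest))
         else .ok (PySem.Dict.mk (pre ++ (cat, PySem.Set.update b (planOf cs seen)) :: rest),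
                   total + ((planOf cs seen).length : Int), ch || !(planOf cs seen).isEmpty)) := by
  intro cs
  induction cs with
  | nil =>
      intro pre rest b seen total ch hn hseen hlt
      simp only [List.map_nil, runE, planOf, List.length_nil]
      rw [if_neg (by omega)]
      simp [PySem.Set.update]
  | cons c cs ih =>
      intro pre rest b seen total ch hn hseen hlt
      have hb := getD_shape cat pre rest b hn
      simp only [List.map_cons, runE, planOf]
      by_cases hc : c ∈ seen
      · rw [hb, if_pos ((hseen c).mp hc), if_pos hc]
        exact ih pre rest b seen total ch hn hseen hlt
      · rw [hb, if_neg (fun h => hc ((hseen c).mpr h)), if_neg hc]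
        have hmod := modify_shape cat pre rest b (fun v => PySem.Set.add v c) hn
        have hn' : ((pre ++ (cat, PySem.Set.add b c) :: rest).map Prod.fst).Nodup := by
          simpa [List.map_append] using hn
        have hseen' : ∀ x, x ∈ PySem.Set.add seen c ↔ x ∈ PySem.Set.add b c := by
          intro x
          rw [PySem.Set.mem_add, PySem.Set.mem_add, hseen]
        by_cases hstop : target ≤ total + 1
        · simp only [hmod]
          rw [if_pos hstop]
          have hlen : (0:Int) ≤ ((planOf cs (PySem.Set.add seen c)).length : Int) := by positivity
          rw [if_pos (by simp only [List.length_cons]; push_cast; omega)]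
          have ht : (target - total).toNat = 1 := by omega
          rw [ht]
          simp [PySem.Set.update, List.take]
        · simp only [hmod]
          rw [if_neg hstop]
          rw [ih pre rest (PySem.Set.add b c) (PySem.Set.add seen c) (total + 1) true hn' hseen' (by omega)]
          have hcond : (target ≤ (total + 1) + ((planOf cs (PySem.Set.add seen c)).length : Int)) ↔
              (target ≤ total + ((c :: planOf cs (PySem.Set.add seen c)).length : Int)) := by
            simp only [List.length_cons]; push_cast; omega
          by_cases hfull : target ≤ (total + 1) + ((planOf cs (PySem.Set.add seen c)).length : Int)
          · rw [if_pos hfull, if_pos (hcond.mp hfull)]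
            have hk : (target - total).toNat = (target - (total + 1)).toNat + 1 := by omega
            rw [hk]
            simp [PySem.Set.update, List.take_succ_cons]
          · rw [if_neg hfull, if_neg (fun h => hfull (hcond.mpr h))]
            simp only [PySem.Set.update, List.foldl_cons, List.length_cons, List.isEmpty_cons,
              Bool.not_false, Bool.or_true, Bool.true_or, Nat.cast_add, Nat.cast_one]
            have harith : total + 1 + ((planOf cs (PySem.Set.add seen c)).length : Int) =
                total + (((planOf cs (PySem.Set.add seen c)).length : Int) + 1) := by ring
            rw [harith]

-- single category stream as a map over the flattened variant list
theorem catStream_cons (cat : String) (b : List (String)) (tl : List (String × List String)) :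
    catStream ((cat, b) :: tl) =
      (b.flatMap pyB_seedVariants).map (fun c => (cat, c)) ++ catStream tl := by
  simp only [catStream, List.flatMap_cons, List.map_flatMap, candPairs]

-- the whole stream, category by category, equals B's plan/slice pipeline
theorem runE_stream (target : Int) :
    ∀ (cur pre : List (String × List String)) (total : Int) (ch : Bool),
      ((pre ++ cur).map Prod.fst).Nodup →
      total < target →
      (outDict (runE target (catStream (cur.map (fun cv => (cv.1, PySem.List.sorted cv.2 (fun x => x) false))))
          (PySem.Dict.mk (pre ++ cur)) total ch)).items
        = pre ++ pyB_cats (target - total) cur := by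
  intro cur
  induction cur with
  | nil =>
      intro pre total ch hn hlt
      simp [catStream, runE, outDict, pyB_cats]
  | cons cb tl ih =>
      intro pre total ch hn hlt
      obtain ⟨cat, b⟩ := cb
      rw [List.map_cons, catStream_cons, runE_append]
      have hseen : ∀ x, x ∈ PySem.Set.ofList b ↔ x ∈ b := fun x => PySem.Set.mem_ofList b x
      rw [runE_segment target cat ((PySem.List.sorted b (fun x => x) false).flatMap pyB_seedVariants)
            pre tl b (PySem.Set.ofList b) total ch hn hseen hlt]
      have hplanB : pyB_plan (PySem.List.sorted b (fun x => x) false) (PySem.Set.ofList b) [] =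
          planOf ((PySem.List.sorted b (fun x => x) false).flatMap pyB_seedVariants) (PySem.Set.ofList b) := by
        rw [pyB_plan_eq]; simp
      have hr0 : (0:Int) ≤ target - total := by omega
      by_cases hfull : target ≤ total +
          ((planOf ((PySem.List.sorted b (fun x => x) false).flatMap pyB_seedVariants) (PySem.Set.ofList b)).length : Int)
      · rw [if_pos hfull]
        simp only [outDict, pyB_cats, hplanB]
        rw [PySem.List.slice_to _ hr0]
        have hminlen : (List.take (target - total).toNat
            (planOf ((PySem.List.sorted b (fun x => x) false).flatMap pyB_seedVariants) (PySem.Set.ofList b))).length =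
            (target - total).toNat := by
          rw [List.length_take]; omega
        rw [if_pos (by rw [hminlen]; omega)]
      · rw [if_neg hfull]
        have hassoc : pre ++ (cat, PySem.Set.update b
            (planOf ((PySem.List.sorted b (fun x => x) false).flatMap pyB_seedVariants) (PySem.Set.ofList b))) :: tl =
            (pre ++ [(cat, PySem.Set.update b
              (planOf ((PySem.List.sorted b (fun x => x) false).flatMap pyB_seedVariants) (PySem.Set.ofList b)))]) ++ tl := by
          simp
        rw [hassoc]
        have hn' : (((pre ++ [(cat, PySem.Set.update b
            (planOf ((PySem.List.sorted b (fun x => x) false).flatMap pyB_seedVariants) (PySem.Set.ofList b)))]) ++ tl).map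
              Prod.fst).Nodup := by
          simpa using hn
        have hih := ih (pre ++ [(cat, PySem.Set.update b
            (planOf ((PySem.List.sorted b (fun x => x) false).flatMap pyB_seedVariants) (PySem.Set.ofList b)))])
            (total + ((planOf ((PySem.List.sorted b (fun x => x) false).flatMap pyB_seedVariants) (PySem.Set.ofList b)).length : Int))
            (ch || !(planOf ((PySem.List.sorted b (fun x => x) false).flatMap pyB_seedVariants) (PySem.Set.ofList b)).isEmpty)
            hn' (by omega)
        rw [hih]
        simp only [pyB_cats, hplanB]
        rw [PySem.List.slice_to _ hr0]
        have htake : List.take (target - total).toNat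
            (planOf ((PySem.List.sorted b (fun x => x) false).flatMap pyB_seedVariants) (PySem.Set.ofList b)) =
            planOf ((PySem.List.sorted b (fun x => x) false).flatMap pyB_seedVariants) (PySem.Set.ofList b) :=
          List.take_of_length_le (by omega)
        rw [htake]
        rw [if_neg (by omega)]
        have harith : target - total -
            ((planOf ((PySem.List.sorted b (fun x => x) false).flatMap pyB_seedVariants) (PySem.Set.ofList b)).length : Int) =
            target - (total + ((planOf ((PySem.List.sorted b (fun x => x) false).flatMap pyB_seedVariants) (PySem.Set.ofList b)).length : Int)) := by
          ring
        rw [harith]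
        simp

-- ===== VERDICT (by name: the statement is the Claim_ definition above) =====
theorem inflate_base_terms_py_spec : Claim_equal_inflate_base_terms_py := by
  intro terms target_total _ hpre
  unfold Spec_inflate_base_terms_py
  unfold inflate_base_terms_py inflate_base_terms_py_alt
  simp only
  by_cases hle : target_total ≤ (((PySem.Dict.mk terms).values).map (fun v => (v.length : Int))).sum
  · rw [if_pos hle, if_pos (by omega)]
  · rw [if_neg hle, if_neg (by omega)]
    rw [pyA_while_eq_outDict target_total _ _ _ _ (by omega) (by omega)]
    have h := runE_stream target_total terms [] (((PySem.Dict.mk terms).values).map (fun v => (v.length : Int))).sum false (by simpa using hpre) (by omega)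
    simpa using h
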